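-- pv_equiv track=rewrite | github.com/Leahxuliu/Data-Structure-And-Algorithm | Python/巨硬/A2打印缺失数字.py | find_miss_integer
-- ===== SOURCE A (Python) =====
-- def find_miss_integer(arr):
--     '''
--     param: sorted array
--     return missing integers in a list
--     '''
--
--     if arr == []:
--         return []
--
--     minVal = arr[0]
--     maxVal = arr[-1]
--     if len(arr) == maxVal - minVal + 1:
--         return []
--
--
--     arr_set = set(arr)
--     res = []
--     for i in range(minVal, maxVal):
--         if i not in arr_set:
--             res.append(i)
--
--     return res
-- ===== SOURCE B (Python) =====
-- def find_miss_integer(arr):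
--     if not arr:
--         return []
--     lo, hi = arr[0], arr[-1]
--     vals = sorted({x for x in arr if lo <= x <= hi})
--     res = []
--     for a, b in zip(vals, vals[1:]):
--         res.extend(range(a + 1, b))
--     return res
-- ===== Notes on version B (the rewrite author's own statement) =====
-- stated objective: simpler
-- what changed: Replaces the set-membership scan over the whole numeric range(min,max) (and A's length==span completeness shortcut) by sorting the distinct in-range values once and emitting the gap between each adjacent pair.
-- intended difference: On nonempty arrays whose length happens to equal last-first+1 yet some integer strictly between first and last is absent (only unsorted or duplicate-containing input, e.g. [1,3,3]), A's completeness shortcut wrongly returns [] while B returns the actually missing integers, the intended result for this function. — e.g. on find_miss_integer([1, 3, 3]): A returns [], B returns [2]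
import Mathlib
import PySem

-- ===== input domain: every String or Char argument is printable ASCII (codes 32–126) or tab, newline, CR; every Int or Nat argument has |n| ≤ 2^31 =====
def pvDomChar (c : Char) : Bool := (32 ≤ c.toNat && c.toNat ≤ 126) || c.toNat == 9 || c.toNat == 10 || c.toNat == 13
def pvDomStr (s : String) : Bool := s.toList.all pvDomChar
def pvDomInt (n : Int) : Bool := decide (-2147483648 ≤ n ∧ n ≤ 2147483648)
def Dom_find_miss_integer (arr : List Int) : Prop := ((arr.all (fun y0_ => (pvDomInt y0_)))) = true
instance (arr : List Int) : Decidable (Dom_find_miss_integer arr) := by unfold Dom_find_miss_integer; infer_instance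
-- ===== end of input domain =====

-- B drops A's set-membership scan over range(min,max) and instead sorts the distinct in-range
-- values once and emits the gap between each adjacent pair (objective: simpler); B also fixes
-- A's completeness shortcut, which is wrong on some unsorted/duplicate inputs (see D_ below).

-- ===== PORT A =====
def find_miss_integer (arr : List Int) : List Int :=
  if arr = [] then []
  else
    let minVal := arr.headD 0
    let maxVal := arr.getLastD 0
    if (arr.length : Int) = maxVal - minVal + 1 then []
    else
      let arrSet : PySem.Set Int := PySem.Set.ofList arr
      (PySem.List.pyRange minVal maxVal).foldl
        (fun res i => if PySem.Set.contains arrSet i = false then res ++ [i] else res) []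

-- ===== PORT B =====
def find_miss_integer_alt (arr : List Int) : List Int :=
  if arr = [] then []
  else
    let lo := arr.headD 0
    let hi := arr.getLastD 0
    let vals := PySem.List.sorted (PySem.Set.ofList (arr.filter (fun x => lo ≤ x && x ≤ hi))) (fun x => x)
    (vals.zip vals.tail).foldl (fun res p => res ++ PySem.List.pyRange (p.1 + 1) p.2) []

-- ===== PRECONDITION & SPEC =====
-- On nonempty arrays whose length equals last-first+1 yet some integer strictly between first and
-- last is absent (only unsorted or duplicate-containing input, e.g. [1,3,3]), A's completeness
-- shortcut wrongly returns [] while B returns the actually missing integers, the intended result.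
def D_find_miss_integer (arr : List Int) : Prop :=
  arr ≠ [] ∧ (arr.length : Int) = arr.getLastD 0 - arr.headD 0 + 1 ∧
    ∃ i ∈ PySem.List.pyRange (arr.headD 0) (arr.getLastD 0), i ∉ arr
instance (arr : List Int) : Decidable (D_find_miss_integer arr) := by
  unfold D_find_miss_integer; infer_instance

def Spec_find_miss_integer (arr : List Int) (out : List Int) : Prop :=
  ¬ D_find_miss_integer arr → out = find_miss_integer_alt arr
instance (arr : List Int) (out : List Int) : Decidable (Spec_find_miss_integer arr out) := by
  unfold Spec_find_miss_integer; infer_instance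

def pvDiffWitness_find_miss_integer : List Int := [1, 3, 3]
def pvDiffWitnessOut_find_miss_integer : (List Int) × (List Int) := ([], [2])

-- ===== CLAIM (what is proved, stated in full; the proofs are below) =====
def Claim_unchanged_find_miss_integer : Prop :=
  ∀ (arr : List Int), Dom_find_miss_integer arr → Spec_find_miss_integer arr (find_miss_integer arr)
def Claim_changed_find_miss_integer : Prop :=
  Dom_find_miss_integer (pvDiffWitness_find_miss_integer) ∧
  D_find_miss_integer (pvDiffWitness_find_miss_integer) ∧
  find_miss_integer (pvDiffWitness_find_miss_integer) = pvDiffWitnessOut_find_miss_integer.1 ∧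
  find_miss_integer_alt (pvDiffWitness_find_miss_integer) = pvDiffWitnessOut_find_miss_integer.2 ∧
  pvDiffWitnessOut_find_miss_integer.1 ≠ pvDiffWitnessOut_find_miss_integer.2
def Claim_exact_find_miss_integer : Prop :=
  ∀ (arr : List Int), Dom_find_miss_integer arr → D_find_miss_integer arr →
    find_miss_integer arr ≠ find_miss_integer_alt arr

-- ===== LEMMAS AND PROOFS =====

-- the integers of [lo, hi) missing from arr, in ascending order
def pvMissing (arr : List Int) (lo hi : Int) : List Int :=
  (PySem.List.pyRange lo hi).filter (fun i => decide (i ∉ arr))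

lemma pvGetLastD_eq_getLast (l : List Int) (h : l ≠ []) (d : Int) : l.getLastD d = l.getLast h := by
  rw [List.getLastD_eq_getLast?, List.getLast?_eq_some_getLast h]; rfl

lemma pvGetLastD_mem (l : List Int) (h : l ≠ []) : l.getLastD 0 ∈ l := by
  rw [pvGetLastD_eq_getLast l h]; exact List.getLast_mem h

lemma pvHeadD_mem (l : List Int) (h : l ≠ []) : l.headD 0 ∈ l := by
  cases l with
  | nil => exact absurd rfl h
  | cons a t => exact List.mem_cons_self ..

lemma pvHeadD_eq_of_min (l : List Int) (hp : l.Pairwise (· < ·)) (lo : Int)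
    (hm : lo ∈ l) (hall : ∀ x ∈ l, lo ≤ x) : l.headD 0 = lo := by
  cases l with
  | nil => cases hm
  | cons a t =>
    simp only [List.headD_cons]
    rcases List.mem_cons.mp hm with h | h
    · exact h.symm
    · exact absurd (hall a (List.mem_cons_self ..)) (not_le.mpr ((List.pairwise_cons.mp hp).1 lo h))

lemma pvGetLastD_eq_of_max (l : List Int) (hp : l.Pairwise (· < ·)) (hi : Int)
    (hm : hi ∈ l) (hall : ∀ x ∈ l, x ≤ hi) : l.getLastD 0 = hi := by
  induction l with
  | nil => cases hm
  | cons a t ih =>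
    cases t with
    | nil => simp only [List.mem_singleton] at hm; simp [hm]
    | cons b t' =>
      have hne : b :: t' ≠ [] := by simp
      have : (a :: b :: t').getLastD 0 = (b :: t').getLastD 0 := by
        rw [List.getLastD_cons, pvGetLastD_eq_getLast _ hne, pvGetLastD_eq_getLast _ hne]
      rw [this]
      refine ih hp.of_cons ?_ (fun x hx => hall x (List.mem_cons_of_mem a hx))
      rcases List.mem_cons.mp hm with h | h
      · exact absurd (hall b (List.mem_cons_of_mem a (List.mem_cons_self ..)))
          (not_le.mpr (h ▸ (List.pairwise_cons.mp hp).1 b (List.mem_cons_self ..)))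
      · exact h

lemma pvGaps_eq : ∀ (vals : List Int), vals.Pairwise (· < ·) →
    (vals.zip vals.tail).flatMap (fun p => PySem.List.pyRange (p.1 + 1) p.2)
      = (PySem.List.pyRange (vals.headD 0) (vals.getLastD 0)).filter
          (fun i => decide (i ∉ vals))
  | [], _ => by simp [PySem.List.pyRange_one_eq_nil (le_refl (0 : Int))]
  | [v], _ => by simp [PySem.List.pyRange_one_eq_nil (le_refl v)]
  | v0 :: v1 :: rest, hp => by
    have hp' : (v1 :: rest).Pairwise (· < ·) := hp.of_cons
    have hall : ∀ x ∈ v1 :: rest, v0 < x := (List.pairwise_cons.mp hp).1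
    have hall1 : ∀ x ∈ rest, v1 < x := (List.pairwise_cons.mp hp').1
    have hv01 : v0 < v1 := hall v1 (List.mem_cons_self ..)
    have hLmem : (v1 :: rest).getLastD 0 ∈ v1 :: rest := pvGetLastD_mem _ (by simp)
    have hv1L : v1 ≤ (v1 :: rest).getLastD 0 := by
      rcases List.mem_cons.mp hLmem with h | h
      · exact le_of_eq h.symm
      · exact le_of_lt (hall1 _ h)
    have hLeq : (v0 :: v1 :: rest).getLastD 0 = (v1 :: rest).getLastD 0 := by
      rw [List.getLastD_cons, pvGetLastD_eq_getLast _ (by simp : v1 :: rest ≠ []),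
        pvGetLastD_eq_getLast _ (by simp : v1 :: rest ≠ [])]
    have hzip : ((v0 :: v1 :: rest).zip (v0 :: v1 :: rest).tail)
        = (v0, v1) :: ((v1 :: rest).zip (v1 :: rest).tail) := by simp [List.zip]
    rw [hzip, List.flatMap_cons, pvGaps_eq (v1 :: rest) hp']
    simp only [List.headD_cons, hLeq]
    rw [PySem.List.pyRange_one_append v0 v1 _ (le_of_lt hv01) hv1L,
      PySem.List.pyRange_one_cons hv01, List.filter_append, List.filter_cons]
    have h0 : ¬ (decide (v0 ∉ v0 :: v1 :: rest) = true) := by simp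
    rw [if_neg h0]
    have h1 : List.filter (fun i => decide (i ∉ v0 :: v1 :: rest))
        (PySem.List.pyRange (v0 + 1) v1) = PySem.List.pyRange (v0 + 1) v1 := by
      apply List.filter_eq_self.mpr
      intro i hi
      have hb := PySem.List.mem_pyRange_one.mp hi
      simp only [decide_eq_true_eq, List.mem_cons, not_or]
      refine ⟨by omega, by omega, fun hmem => ?_⟩
      exact absurd (hall1 i hmem) (by omega)
    have h2 : List.filter (fun i => decide (i ∉ v0 :: v1 :: rest))
        (PySem.List.pyRange v1 ((v1 :: rest).getLastD 0))
        = List.filter (fun i => decide (i ∉ v1 :: rest))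
            (PySem.List.pyRange v1 ((v1 :: rest).getLastD 0)) := by
      apply List.filter_congr
      intro i hi
      have hb := PySem.List.mem_pyRange_one.mp hi
      simp only [decide_eq_decide, List.mem_cons, not_or]
      constructor
      · rintro ⟨-, h⟩; exact h
      · rintro ⟨h1', h2'⟩; exact ⟨by omega, h1', h2'⟩
    rw [h1, h2]

lemma pvAlt_eq_missing (arr : List Int) (h : arr ≠ []) :
    find_miss_integer_alt arr = pvMissing arr (arr.headD 0) (arr.getLastD 0) := by
  unfold find_miss_integer_alt
  rw [if_neg h]
  set lo := arr.headD 0 with hlo_def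
  set hi := arr.getLastD 0 with hhi_def
  set vals := PySem.List.sorted (PySem.Set.ofList (arr.filter (fun x => lo ≤ x && x ≤ hi)))
    (fun x => x) with hvals
  have hp : vals.Pairwise (· < ·) := PySem.List.sorted_ofList_pairwise_lt _
  have hmem : ∀ x, x ∈ vals ↔ x ∈ arr ∧ lo ≤ x ∧ x ≤ hi := by
    intro x
    rw [hvals, PySem.List.mem_sorted, PySem.Set.mem_ofList, List.mem_filter]
    simp
  rw [PySem.List.foldl_append_eq_flatMap, List.nil_append, pvGaps_eq vals hp]
  by_cases hlohi : lo ≤ hi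
  · have hlov : lo ∈ vals := (hmem lo).mpr ⟨pvHeadD_mem arr h, le_refl lo, hlohi⟩
    have hhiv : hi ∈ vals := (hmem hi).mpr ⟨pvGetLastD_mem arr h, hlohi, le_refl hi⟩
    have hhead : vals.headD 0 = lo :=
      pvHeadD_eq_of_min vals hp lo hlov (fun x hx => ((hmem x).mp hx).2.1)
    have hlast : vals.getLastD 0 = hi :=
      pvGetLastD_eq_of_max vals hp hi hhiv (fun x hx => ((hmem x).mp hx).2.2)
    rw [hhead, hlast]
    unfold pvMissing
    apply List.filter_congr
    intro i hi_mem
    have hb := PySem.List.mem_pyRange_one.mp hi_mem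
    simp only [decide_eq_decide]
    rw [not_iff_not, hmem i]
    constructor
    · rintro ⟨ha, -, -⟩; exact ha
    · intro ha; exact ⟨ha, hb.1, le_of_lt hb.2⟩
  · have hvnil : vals = [] := by
      rw [List.eq_nil_iff_forall_not_mem]
      intro x hx
      have := ((hmem x).mp hx).2
      omega
    rw [hvnil]
    simp only [pvMissing, List.headD_nil, List.getLastD_nil,
      PySem.List.pyRange_one_eq_nil (le_refl (0 : Int)),
      PySem.List.pyRange_one_eq_nil (by omega : hi ≤ lo), List.filter_nil]

lemma pvA_eq_missing (arr : List Int) (h : arr ≠ [])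
    (hlen : ¬ ((arr.length : Int) = arr.getLastD 0 - arr.headD 0 + 1)) :
    find_miss_integer arr = pvMissing arr (arr.headD 0) (arr.getLastD 0) := by
  unfold find_miss_integer
  rw [if_neg h]
  simp only []
  rw [if_neg hlen]
  rw [PySem.List.foldl_append_ite_eq_filter
    (fun i => PySem.Set.contains (PySem.Set.ofList arr) i = false), List.nil_append]
  unfold pvMissing
  apply List.filter_congr
  intro i _
  simp only [decide_eq_decide]
  rw [← Bool.not_eq_true, not_iff_not, PySem.Set.contains_iff, PySem.Set.mem_ofList]

-- ===== VERDICT (by name: the statement is the Claim_ definition above) =====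
theorem find_miss_integer_spec : Claim_unchanged_find_miss_integer := by
  intro arr _
  unfold Spec_find_miss_integer
  intro hnd
  by_cases h : arr = []
  · subst h; rfl
  · by_cases hlen : (arr.length : Int) = arr.getLastD 0 - arr.headD 0 + 1
    · have hA : find_miss_integer arr = [] := by
        unfold find_miss_integer
        rw [if_neg h]
        simp only []
        rw [if_pos hlen]
      have hB : find_miss_integer_alt arr = [] := by
        rw [pvAlt_eq_missing arr h]
        unfold pvMissing
        rw [List.filter_eq_nil_iff]
        intro i hi
        simp only [decide_eq_true_eq, not_not]
        by_contra hni
        exact hnd ⟨h, hlen, i, hi, hni⟩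
      rw [hA, hB]
    · rw [pvA_eq_missing arr h hlen, pvAlt_eq_missing arr h]

theorem find_miss_integer_changed : Claim_changed_find_miss_integer := by
  unfold Claim_changed_find_miss_integer; decide

theorem find_miss_integer_tight : Claim_exact_find_miss_integer := by
  intro arr _ hd
  unfold D_find_miss_integer at hd
  obtain ⟨hne, hlen, i, him, hni⟩ := hd
  have hA : find_miss_integer arr = [] := by
    unfold find_miss_integer
    rw [if_neg hne]
    simp only []
    rw [if_pos hlen]
  have hmemf : i ∈ pvMissing arr (arr.headD 0) (arr.getLastD 0) :=
    List.mem_filter.mpr ⟨him, by simp [hni]⟩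
  rw [hA, pvAlt_eq_missing arr hne]
  intro heq
  exact List.ne_nil_of_mem hmemf heq.symm
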